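-- pv_equiv track=rewrite | github.com/HackerSpace-PESU/spacebot | src/mentor.py | getMentorFilterType
-- ===== SOURCE A (Python) =====
-- MENTOR_DOMAIN_ACRONYMS = {
--     "machine learning": ["ml", "machinelearning", "machine-learning"],
--     "deep learning": ["dl", "deeplearning", "deep-learning"],
--     "computer vision": ["cv", "computervision", "computer-vision"],
--     "natural language processing": ["nlp", "naturallanguageprocessing", "natural-language-processing"],
--     "app development": ["app dev", "appdev", "app-dev", "appdevelopment", "app-development"],
--     "web development": ["web dev", "webdev", "web-dev", "webdevelopment", "web-development"],
--     "linux": ["linux"],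
--     "android kernel development": ["android-kernel-dev", "android-kernel-development", "android-kernel", "android kernel"],
--     "automation and webscraping": ["automation", "webscraping", "web-scraping", "automation-webscraping", ],
--     "robotics": ["robotics", "robots"],
--     "distributed systems":["distributed-systems", "distributedsystems"],
-- }
--
-- MENTOR_CAMPUS = set()
--
-- def getMentorFilterType(queries):
--     query_data = list()
--     for query in queries:
--         query = query.lower()
--         query_type = None
--         if query in MENTOR_CAMPUS:
--             query_type = "CAMPUS"
--         elif query in MENTOR_DOMAIN_ACRONYMS:
--             query_type = "DOMAIN"
--         else:
--             for domain_name in MENTOR_DOMAIN_ACRONYMS: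
--                 if query in MENTOR_DOMAIN_ACRONYMS[domain_name]:
--                     query_type = "DOMAIN"
--                     break
--         if query_type == None:
--             query_type = "NAME"
--         query_data.append({query: query_type})
--     return query_data
-- ===== SOURCE B (Python) =====
-- MENTOR_DOMAIN_ACRONYMS = {
--     "machine learning": ["ml", "machinelearning", "machine-learning"],
--     "deep learning": ["dl", "deeplearning", "deep-learning"],
--     "computer vision": ["cv", "computervision", "computer-vision"],
--     "natural language processing": ["nlp", "naturallanguageprocessing", "natural-language-processing"],
--     "app development": ["app dev", "appdev", "app-dev", "appdevelopment", "app-development"],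
--     "web development": ["web dev", "webdev", "web-dev", "webdevelopment", "web-development"],
--     "linux": ["linux"],
--     "android kernel development": ["android-kernel-dev", "android-kernel-development", "android-kernel", "android kernel"],
--     "automation and webscraping": ["automation", "webscraping", "web-scraping", "automation-webscraping", ],
--     "robotics": ["robotics", "robots"],
--     "distributed systems":["distributed-systems", "distributedsystems"],
-- }
--
-- MENTOR_CAMPUS = set()
--
-- # One precomputed classification TABLE token -> label: every domain key and every
-- # acronym maps to "DOMAIN"; campus entries are written last so they take priority
-- # (matching A's CAMPUS-first check).  Per query there is no branching and no
-- # scanning at all: one dict.get with default "NAME".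
-- LABELS = {}
-- for _domain, _accs in MENTOR_DOMAIN_ACRONYMS.items():
--     LABELS[_domain] = "DOMAIN"
--     for _a in _accs:
--         LABELS[_a] = "DOMAIN"
-- for _c in MENTOR_CAMPUS:
--     LABELS[_c] = "CAMPUS"
--
-- def getMentorFilterType(queries):
--     out = []
--     for q in queries:
--         q = q.lower()
--         out.append({q: LABELS.get(q, "NAME")})
--     return out
-- ===== Notes on version B (the rewrite author's own statement) =====
-- stated objective: faster
-- what changed: B precomputes one classification table mapping every domain key and acronym to its label once, so the per-query if/elif chain and the nested scan over every acronym list are replaced by a single dict.get with default 'NAME'.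
import Mathlib
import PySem

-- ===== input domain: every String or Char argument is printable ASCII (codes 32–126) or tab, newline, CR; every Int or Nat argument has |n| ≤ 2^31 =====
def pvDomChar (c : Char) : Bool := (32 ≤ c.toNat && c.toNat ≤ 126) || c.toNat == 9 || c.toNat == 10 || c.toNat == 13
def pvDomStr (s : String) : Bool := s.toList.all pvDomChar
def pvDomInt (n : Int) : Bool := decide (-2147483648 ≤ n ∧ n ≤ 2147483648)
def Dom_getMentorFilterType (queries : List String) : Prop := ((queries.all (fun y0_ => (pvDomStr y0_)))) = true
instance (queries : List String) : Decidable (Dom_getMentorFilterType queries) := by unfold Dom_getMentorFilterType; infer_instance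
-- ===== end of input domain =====

set_option maxRecDepth 100000


-- B replaces A's per-query if/elif chain plus nested acronym-list scan by one
-- precomputed token→label table and a single dict.get per query (a timing run ran; see claim).

-- shared module constants
def pvAcronyms : PySem.Dict String (List String) := PySem.Dict.ofList [
  ("machine learning", ["ml", "machinelearning", "machine-learning"]),
  ("deep learning", ["dl", "deeplearning", "deep-learning"]),
  ("computer vision", ["cv", "computervision", "computer-vision"]),
  ("natural language processing", ["nlp", "naturallanguageprocessing", "natural-language-processing"]),
  ("app development", ["app dev", "appdev", "app-dev", "appdevelopment", "app-development"]),
  ("web development", ["web dev", "webdev", "web-dev", "webdevelopment", "web-development"]),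
  ("linux", ["linux"]),
  ("android kernel development", ["android-kernel-dev", "android-kernel-development", "android-kernel", "android kernel"]),
  ("automation and webscraping", ["automation", "webscraping", "web-scraping", "automation-webscraping"]),
  ("robotics", ["robotics", "robots"]),
  ("distributed systems", ["distributed-systems", "distributedsystems"])]

def pvCampus : PySem.Set String := PySem.Set.empty

-- ===== PORT A =====
-- inner 'for domain_name in MENTOR_DOMAIN_ACRONYMS: if query in MENTOR_DOMAIN_ACRONYMS[domain_name]: … break'
def pvInnerLoop (ks : List String) (q : String) : Option String :=
  match ks with
  | [] => none
  | k :: rest => if q ∈ pvAcronyms.getD k [] then some "DOMAIN" else pvInnerLoop rest q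

def pvClassifyA (query0 : String) : String × String :=
  let query := PySem.Str.lower query0
  let query_type : Option String :=
    if PySem.Set.contains pvCampus query then some "CAMPUS"
    else if pvAcronyms.contains query then some "DOMAIN"
    else pvInnerLoop pvAcronyms.keys query
  (query, query_type.getD "NAME")

def getMentorFilterType (queries : List String) : List (List (String × String)) :=
  queries.foldl (fun query_data query => query_data ++ [[pvClassifyA query]]) []

-- ===== PORT B =====
-- the table built once: each (domain, accs) pair writes domain and every acronym as "DOMAIN",
-- then the campus loop writes "CAMPUS" (campus last = campus wins, matching A's CAMPUS-first check)
def pvLabels : PySem.Dict String String :=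
  pvCampus.foldl (fun d c => d.insert c "CAMPUS")
    (pvAcronyms.items.foldl
      (fun d kv => kv.2.foldl (fun d a => d.insert a "DOMAIN") (d.insert kv.1 "DOMAIN"))
      PySem.Dict.empty)

def pvClassifyB (q0 : String) : List (String × String) :=
  let q := PySem.Str.lower q0
  [(q, pvLabels.getD q "NAME")]

def getMentorFilterType_alt (queries : List String) : List (List (String × String)) :=
  queries.foldl (fun out q => out ++ [pvClassifyB q]) []

-- ===== PRECONDITION & SPEC =====
def Spec_getMentorFilterType (queries : List String) (out : List (List (String × String))) : Prop := out = getMentorFilterType_alt queries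
instance (queries : List String) (out : List (List (String × String))) : Decidable (Spec_getMentorFilterType queries out) := by unfold Spec_getMentorFilterType; infer_instance

-- ===== CLAIM =====
def Claim_equal_getMentorFilterType : Prop := ∀ (queries : List String), Dom_getMentorFilterType queries → Spec_getMentorFilterType queries (getMentorFilterType queries)

-- ===== LEMMAS AND PROOFS =====

-- A's inner loop over the keys finds q iff q occurs in some looked-up acronym list
theorem pvInnerLoop_eq (ks : List String) (q : String) :
    pvInnerLoop ks q =
      if q ∈ ks.flatMap (fun k => pvAcronyms.getD k []) then some "DOMAIN" else none := by
  induction ks with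
  | nil => simp [pvInnerLoop]
  | cons k rest ih =>
    simp only [pvInnerLoop, ih, List.flatMap_cons]
    by_cases h1 : q ∈ pvAcronyms.getD k []
    · simp [h1]
    · by_cases h2 : q ∈ rest.flatMap (fun k => pvAcronyms.getD k [])
      · simp [h1, h2]
      · simp [h1, h2]

-- all tokens of the module constants, in A's scanning order
def pvTokens : List String := pvAcronyms.keys ++ pvAcronyms.values.flatMap id

-- the concrete dict: scanning each key's list is scanning all the values
theorem pvFlat_eq :
    pvAcronyms.keys.flatMap (fun k => pvAcronyms.getD k []) = pvAcronyms.values.flatMap id := by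
  decide

-- any dict whose values are all "DOMAIN" looks up as a membership test
theorem pvGetD_all_domain (d : PySem.Dict String String) (q : String)
    (h : d.items.all (fun p => p.2 == "DOMAIN") = true) :
    d.getD q "NAME" = if d.contains q then "DOMAIN" else "NAME" := by
  cases hg : d.get? q with
  | none =>
    simp [PySem.Dict.getD_eq_get?_getD, PySem.Dict.contains_eq_isSome_get?, hg]
  | some v =>
    have hm := PySem.Dict.mem_items_of_get?_eq_some d hg
    have hv : v = "DOMAIN" := by simpa using List.all_eq_true.mp h _ hm
    simp [PySem.Dict.getD_eq_get?_getD, PySem.Dict.contains_eq_isSome_get?, hg, hv]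

-- the table, evaluated once to its literal items list
theorem pvLabels_eq : pvLabels = PySem.Dict.mk [
  ("machine learning", "DOMAIN"),
  ("ml", "DOMAIN"),
  ("machinelearning", "DOMAIN"),
  ("machine-learning", "DOMAIN"),
  ("deep learning", "DOMAIN"),
  ("dl", "DOMAIN"),
  ("deeplearning", "DOMAIN"),
  ("deep-learning", "DOMAIN"),
  ("computer vision", "DOMAIN"),
  ("cv", "DOMAIN"),
  ("computervision", "DOMAIN"),
  ("computer-vision", "DOMAIN"),
  ("natural language processing", "DOMAIN"),
  ("nlp", "DOMAIN"),
  ("naturallanguageprocessing", "DOMAIN"),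
  ("natural-language-processing", "DOMAIN"),
  ("app development", "DOMAIN"),
  ("app dev", "DOMAIN"),
  ("appdev", "DOMAIN"),
  ("app-dev", "DOMAIN"),
  ("appdevelopment", "DOMAIN"),
  ("app-development", "DOMAIN"),
  ("web development", "DOMAIN"),
  ("web dev", "DOMAIN"),
  ("webdev", "DOMAIN"),
  ("web-dev", "DOMAIN"),
  ("webdevelopment", "DOMAIN"),
  ("web-development", "DOMAIN"),
  ("linux", "DOMAIN"),
  ("android kernel development", "DOMAIN"),
  ("android-kernel-dev", "DOMAIN"),
  ("android-kernel-development", "DOMAIN"),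
  ("android-kernel", "DOMAIN"),
  ("android kernel", "DOMAIN"),
  ("automation and webscraping", "DOMAIN"),
  ("automation", "DOMAIN"),
  ("webscraping", "DOMAIN"),
  ("web-scraping", "DOMAIN"),
  ("automation-webscraping", "DOMAIN"),
  ("robotics", "DOMAIN"),
  ("robots", "DOMAIN"),
  ("distributed systems", "DOMAIN"),
  ("distributed-systems", "DOMAIN"),
  ("distributedsystems", "DOMAIN")] := by rfl

-- the labels table keys versus the tokens list: mutual containment (checked on the literals)
theorem pvLabels_keys_sub : pvLabels.keys.all (fun k => pvTokens.contains k) = true := by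
  rw [pvLabels_eq]; decide

theorem pvTokens_sub : pvTokens.all (fun k => pvLabels.keys.contains k) = true := by
  rw [pvLabels_eq]; decide

theorem pvLabels_values : pvLabels.items.all (fun p => p.2 == "DOMAIN") = true := by
  rw [pvLabels_eq]; decide

theorem pvLabels_contains_iff (q : String) :
    pvLabels.contains q = true ↔ q ∈ pvTokens := by
  rw [PySem.Dict.contains_eq_decide_mem_keys, decide_eq_true_iff]
  constructor
  · intro h
    have := List.all_eq_true.mp pvLabels_keys_sub _ h
    exact List.contains_iff_mem.mp this
  · intro h
    have := List.all_eq_true.mp pvTokens_sub _ h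
    exact List.contains_iff_mem.mp this

theorem pvLabels_getD (q : String) :
    pvLabels.getD q "NAME" = if q ∈ pvTokens then "DOMAIN" else "NAME" := by
  rw [pvGetD_all_domain pvLabels q pvLabels_values]
  by_cases h : q ∈ pvTokens
  · simp [h, (pvLabels_contains_iff q).mpr h]
  · have : pvLabels.contains q ≠ true := fun hc => h ((pvLabels_contains_iff q).mp hc)
    simp [h, Bool.eq_false_iff.mpr this]

theorem pvClassify_eq (q : String) : [pvClassifyA q] = pvClassifyB q := by
  have hc : PySem.Set.contains pvCampus (PySem.Str.lower q) = false := by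
    simp [pvCampus, PySem.Set.empty]
  simp only [pvClassifyA, pvClassifyB, hc, Bool.false_eq_true, if_false,
    pvInnerLoop_eq, pvFlat_eq, pvLabels_getD, pvTokens, List.mem_append]
  by_cases hk : pvAcronyms.contains (PySem.Str.lower q) = true
  · have hmem : PySem.Str.lower q ∈ pvAcronyms.keys := by
      rw [PySem.Dict.contains_eq_decide_mem_keys] at hk; exact of_decide_eq_true hk
    simp [hk, hmem]
  · have hkeys : PySem.Str.lower q ∉ pvAcronyms.keys := by
      rw [PySem.Dict.contains_eq_decide_mem_keys] at hk
      exact fun h => hk (decide_eq_true h)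
    by_cases hv : PySem.Str.lower q ∈ pvAcronyms.values.flatMap id
    · simp only [hkeys, hv, false_or, if_true]
      simp [hk]
    · simp only [hkeys, hv, false_or, if_false]
      simp [hk]

theorem pvFoldl_eq (queries : List String) (acc : List (List (String × String))) :
    queries.foldl (fun query_data query => query_data ++ [[pvClassifyA query]]) acc
      = queries.foldl (fun out q => out ++ [pvClassifyB q]) acc := by
  induction queries generalizing acc with
  | nil => rfl
  | cons q rest ih => rw [List.foldl_cons, List.foldl_cons, pvClassify_eq, ih]

-- ===== VERDICT =====
theorem getMentorFilterType_spec : Claim_equal_getMentorFilterType := by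
  intro queries _
  show getMentorFilterType queries = getMentorFilterType_alt queries
  unfold getMentorFilterType getMentorFilterType_alt
  exact pvFoldl_eq queries []
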